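-- pv_equiv track=rewrite | github.com/sujin403/programmers | 2단계/택배상자.py | solution
-- ===== SOURCE A (Python) =====
-- def solution(order):
--     answer = 0
--     sub_belt = []
--     item = 1
--     while item != len(order) + 1 :
--         sub_belt.append(item)
--         while sub_belt and sub_belt[-1] == order[answer] :
--             answer += 1
--             sub_belt.pop()
--         item += 1
--     return answer
-- ===== SOURCE B (Python) =====
-- def solution(order):
--     count = 0
--     item = 1
--     stack = []
--     n = len(order)
--     for t in order:
--         if stack and stack[-1] == t:
--             stack.pop()
--             count += 1
--         elif item <= t <= n:
--             stack.extend(range(item, t))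
--             item = t + 1
--             count += 1
--         else:
--             break
--     return count
-- ===== Notes on version B (the rewrite author's own statement) =====
-- stated objective: alternative
-- what changed: B drives the loop off the required order (pop a matching top / batch-push the belt range up to the needed box / stop for good on a buried or out-of-range target) instead of A's box-by-box belt simulation with a nested pop loop.
import Mathlib
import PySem

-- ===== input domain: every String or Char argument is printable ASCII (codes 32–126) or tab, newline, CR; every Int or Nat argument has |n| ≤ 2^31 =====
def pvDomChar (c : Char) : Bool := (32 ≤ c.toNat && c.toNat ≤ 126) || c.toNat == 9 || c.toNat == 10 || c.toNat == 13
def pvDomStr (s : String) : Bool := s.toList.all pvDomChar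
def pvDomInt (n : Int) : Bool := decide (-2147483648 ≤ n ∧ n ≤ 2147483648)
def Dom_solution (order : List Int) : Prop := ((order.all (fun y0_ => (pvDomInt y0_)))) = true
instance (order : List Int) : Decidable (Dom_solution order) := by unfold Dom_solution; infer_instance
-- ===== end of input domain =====

-- B drives the loop off `order` (pop a matching top, or batch-push the belt up to the
-- needed box, or stop for good) instead of simulating the belt box by box: alternative
-- decomposition of the same stack process.

-- ===== PORT A =====
-- inner `while sub_belt and sub_belt[-1] == order[answer]`: pop while the top matches.
-- `order[answer]` is PySem.List.pyGet?; `none` would be Python's IndexError (never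
-- reached from `solution`'s states, where a full answer forces an empty belt).
def innerA (order : List Int) (answer : Int) (belt : List Int) : Int × List Int :=
  if h : belt = [] then (answer, belt)
  else
    match PySem.List.pyGet? order answer with
    | none => (answer, belt)
    | some t =>
      if belt.getLast? = some t then innerA order (answer + 1) belt.dropLast
      else (answer, belt)
termination_by belt.length
decreasing_by
  have : belt.length ≠ 0 := fun hl => h (List.eq_nil_of_length_eq_zero hl)
  simp [List.length_dropLast]; omega

-- outer `while item != len(order) + 1`: item runs over 1, …, len(order); each turn
-- appends `item` to the belt and runs the inner while.
def solution (order : List Int) : Int :=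
  ((PySem.List.pyRange 1 ((order.length : Int) + 1) 1).foldl
      (fun st item => innerA order st.1 (st.2 ++ [item])) ((0 : Int), ([] : List Int))).1

-- ===== PORT B =====
-- `for t in order` with an early break, state (count, item, stack).
def goB (n : Int) (ts : List Int) (count item : Int) (stack : List Int) : Int :=
  match ts with
  | [] => count
  | t :: rest =>
    if stack ≠ [] ∧ stack.getLast? = some t then
      goB n rest (count + 1) item stack.dropLast
    else if item ≤ t ∧ t ≤ n then
      goB n rest (count + 1) (t + 1) (stack ++ PySem.List.pyRange item t 1)
    else count

def solution_alt (order : List Int) : Int :=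
  goB (order.length : Int) order 0 1 []

-- ===== PRECONDITION & SPEC =====
def Spec_solution (order : List Int) (out : Int) : Prop := out = solution_alt order
instance (order : List Int) (out : Int) : Decidable (Spec_solution order out) := by unfold Spec_solution; infer_instance

-- ===== CLAIM (what is proved, stated in full; the proofs are below) =====
def Claim_equal_solution : Prop := ∀ (order : List Int), Dom_solution order → Spec_solution order (solution order)

-- ===== LEMMAS AND PROOFS =====

-- `Stab order j stack`: the inner while loop at answer `j`, belt `stack` would pop nothing.
def Stab (order : List Int) (j : Int) (stack : List Int) : Prop :=
  ∀ t, PySem.List.pyGet? order j = some t → stack.getLast? ≠ some t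

theorem inner_stop {order : List Int} {j : Int} {stack : List Int}
    (h : Stab order j stack) : innerA order j stack = (j, stack) := by
  rw [innerA]
  split
  · rfl
  · cases hg : PySem.List.pyGet? order j with
    | none => rfl
    | some t => simp [h t hg]

theorem inner_ge (order : List Int) (j : Int) (belt : List Int) :
    j ≤ (innerA order j belt).1 := by
  fun_induction innerA with
  | case1 => simp
  | case2 => simp
  | case3 j belt _ t _ _ ih => simp only at ih ⊢; omega
  | case4 => simp

theorem inner_mem (order : List Int) (j : Int) (belt : List Int) :
    ∀ x ∈ (innerA order j belt).2, x ∈ belt := by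
  fun_induction innerA with
  | case1 => simp
  | case2 => simp
  | case3 j belt _ t _ _ ih =>
    intro x hx
    exact (List.dropLast_sublist belt).mem (ih x hx)
  | case4 => simp

theorem inner_stab (order : List Int) (j : Int) (belt : List Int) :
    Stab order (innerA order j belt).1 (innerA order j belt).2 := by
  fun_induction innerA with
  | case1 a => intro t _; simp
  | case2 j belt hne hg => intro t ht; rw [ht] at hg; cases hg
  | case3 j belt hne t hg hl ih => exact ih
  | case4 j belt hne t hg hcond => intro u hu; rw [hg] at hu; injection hu with hu; subst hu; exact hcond

-- reading `order` at a nonnegative in-range index splits off the matching suffix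
theorem drop_of_pyGet? {order : List Int} {j t : Int} (hj : 0 ≤ j)
    (hg : PySem.List.pyGet? order j = some t) :
    order.drop j.toNat = t :: order.drop (j.toNat + 1) := by
  rw [PySem.List.pyGet?_of_nonneg order hj] at hg
  have hlt : j.toNat < order.length := by
    by_contra hle
    rw [List.getElem?_eq_none (by omega)] at hg
    cases hg
  rw [List.drop_eq_getElem_cons hlt]
  rw [List.getElem?_eq_getElem hlt] at hg
  simp [Option.some.injEq] at hg
  rw [hg]

-- B's pop chain mirrors A's inner while: running goB from the state before the chain
-- equals running it from the inner loop's fixpoint.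
theorem chainB (order : List Int) (m item : Int) (j : Int) (belt : List Int) (hj : 0 ≤ j) :
    goB m (order.drop j.toNat) j item belt
      = goB m (order.drop (innerA order j belt).1.toNat) (innerA order j belt).1 item
          (innerA order j belt).2 := by
  fun_induction innerA with
  | case1 => rfl
  | case2 => rfl
  | case3 j belt hne t hg hl ih =>
    have hdrop := drop_of_pyGet? hj hg
    rw [hdrop]
    rw [goB]
    simp only [hne, hl, ne_eq, not_false_iff, true_and, if_pos]
    have h1 : (j + 1).toNat = j.toNat + 1 := by omega
    rw [← h1]
    exact ih (by omega)
  | case4 => rfl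

-- A's belt, once stuck at answer `j` whose target is below every future box (or beyond
-- the belt), never pops again: the fold's answer stays `j`.
theorem break_run (order : List Int) (jm : Nat) : ∀ (a j : Int), (((order.length : Int) + 1) - a).toNat = jm →
    (∀ x, PySem.List.pyGet? order j = some x → x < a ∨ (order.length : Int) < x) →
    ∀ stack, ((PySem.List.pyRange a ((order.length : Int) + 1) 1).foldl
        (fun st item => innerA order st.1 (st.2 ++ [item])) (j, stack)).1 = j := by
  induction jm with
  | zero =>
    intro a j hm hx stack
    rw [PySem.List.pyRange_one_eq_nil (by omega)]
    rfl
  | succ k ih =>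
    intro a j hm hx stack
    rw [PySem.List.pyRange_one_cons (by omega)]
    simp only [List.foldl_cons]
    have hstep : innerA order j (stack ++ [a]) = (j, stack ++ [a]) := by
      apply inner_stop
      intro t ht
      rw [List.getLast?_concat]
      have := hx t ht
      intro hc
      injection hc with hc
      omega
    rw [hstep]
    apply ih (a + 1) j (by omega)
    intro x hgx
    rcases hx x hgx with h | h
    · left; omega
    · right; exact h
  
-- pushing the boxes a, a+1, …, t-1 (all below the target t = order[j]) pops nothing:
-- they accumulate on the belt.
theorem push_run (order : List Int) (d : Nat) : ∀ (a j t : Int), (t - a).toNat = d →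
    a ≤ t → t ≤ (order.length : Int) → PySem.List.pyGet? order j = some t →
    ∀ stack, (PySem.List.pyRange a ((order.length : Int) + 1) 1).foldl
        (fun st item => innerA order st.1 (st.2 ++ [item])) (j, stack)
      = (PySem.List.pyRange t ((order.length : Int) + 1) 1).foldl
        (fun st item => innerA order st.1 (st.2 ++ [item])) (j, stack ++ PySem.List.pyRange a t 1) := by
  induction d with
  | zero =>
    intro a j t hm h1 h2 hg stack
    have hat : a = t := by omega
    subst hat
    rw [PySem.List.pyRange_one_eq_nil (a := a) (b := a) le_rfl]
    simp
  | succ k ih =>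
    intro a j t hm h1 h2 hg stack
    have hlt : a < t := by omega
    rw [PySem.List.pyRange_one_cons (by omega)]
    simp only [List.foldl_cons]
    have hstep : innerA order j (stack ++ [a]) = (j, stack ++ [a]) := by
      apply inner_stop
      intro u hu
      rw [hu] at hg
      injection hg with hg
      rw [List.getLast?_concat]
      intro hc
      injection hc with hc
      omega
    rw [hstep]
    rw [ih (a + 1) j t (by omega) (by omega) h2 hg (stack ++ [a])]
    rw [PySem.List.pyRange_one_cons hlt]
    simp

-- Main simulation: from any stable state, A's remaining belt fold and B's remaining
-- order loop compute the same count.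
theorem main_sim (order : List Int) (jm : Nat) : ∀ (a j : Int) (stack : List Int),
    (((order.length : Int) + 1) - a).toNat = jm → 0 ≤ j → a ≤ (order.length : Int) + 1 →
    (∀ x ∈ stack, x < a) → Stab order j stack →
    ((PySem.List.pyRange a ((order.length : Int) + 1) 1).foldl
        (fun st item => innerA order st.1 (st.2 ++ [item])) (j, stack)).1
      = goB (order.length : Int) (order.drop j.toNat) j a stack := by
  induction jm using Nat.strong_induction_on with
  | _ jm ih =>
    intro a j stack hm hj ha hstk hstab
    cases hg : PySem.List.pyGet? order j with
    | none =>
      have hlen : (order.length : Int) ≤ j := by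
        rw [PySem.List.pyGet?_eq_none_iff] at hg
        unfold PySem.Raise.InRange at hg
        omega
      rw [List.drop_eq_nil_of_le (by omega), goB]
      exact break_run order jm a j hm (fun x hx => by rw [hx] at hg; cases hg) stack
    | some t =>
      have hdrop := drop_of_pyGet? hj hg
      rw [hdrop, goB]
      have hnota : ¬ (stack ≠ [] ∧ stack.getLast? = some t) := by
        rintro ⟨_, hl⟩; exact hstab t hg hl
      rw [if_neg hnota]
      by_cases hserve : a ≤ t ∧ t ≤ (order.length : Int)
      · rw [if_pos hserve]
        obtain ⟨h1, h2⟩ := hserve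
        -- A: push a .. t-1 silently, then push t and run the pop chain
        rw [push_run order (t - a).toNat a j t rfl h1 h2 hg stack]
        rw [PySem.List.pyRange_one_cons (a := t) (b := (order.length : Int) + 1) (by omega)]
        simp only [List.foldl_cons]
        set S := stack ++ PySem.List.pyRange a t 1 with hS
        have hpop : innerA order j (S ++ [t]) = innerA order (j + 1) S := by
          rw [innerA]
          rw [dif_neg (by simp)]
          rw [hg]
          simp only [List.getLast?_concat, List.dropLast_concat]
          simp
        rw [hpop]
        have hSlt : ∀ x ∈ S, x < t + 1 := by
          intro x hx
          rcases List.mem_append.mp hx with h | h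
          · have := hstk x h; omega
          · have := (PySem.List.mem_pyRange_one).mp h; omega
        have hrec := ih ((((order.length : Int) + 1) - (t + 1)).toNat) (by omega)
          (t + 1) (innerA order (j + 1) S).1 (innerA order (j + 1) S).2 rfl
          (by have := inner_ge order (j + 1) S; omega) (by omega)
          (fun x hx => hSlt x (inner_mem order (j + 1) S x hx))
          (inner_stab order (j + 1) S)
        rw [hrec]
        have hchain := chainB order (order.length : Int) (t + 1) (j + 1) S (by omega)
        have hj1 : (j + 1).toNat = j.toNat + 1 := by omega
        rw [← hj1, hchain]
      · rw [if_neg hserve]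
        apply break_run order jm a j hm _ stack
        intro x hx
        rw [hx] at hg
        injection hg with hg
        subst hg
        omega

-- ===== VERDICT (by name: the statement is the Claim_ definition above) =====
theorem solution_spec : Claim_equal_solution := by
  intro order _
  unfold Spec_solution solution solution_alt
  have h := main_sim order ((order.length : Int) + 1 - 1).toNat 1 0 []
    rfl (by omega) (by omega) (by simp) (by intro t _; simp)
  simpa using h
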